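-- pv_equiv track=rewrite | github.com/mautorresp/Teleport | tools/export_teleport_math_v5.py | leb_len
-- ===== SOURCE A (Python) =====
-- def assert_integer_only(*values):
--     """R0: Hard assert no floats anywhere"""
--     for i, val in enumerate(values):
--         if isinstance(val, float):
--             raise ValueError(f"RAIL_FAIL:R0 Float detected at position {i}: {val} (type: {type(val)})")
--
-- def leb_len(n: int) -> int:
--     """7-bit groups count for unsigned n"""
--     assert_integer_only(n)
--     if n == 0:
--         return 1
--     length = 0
--     while n > 0:
--         length += 1
--         n >>= 7
--     return length
-- ===== SOURCE B (Python) =====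
-- def assert_integer_only(*values):
--     """R0: Hard assert no floats anywhere"""
--     for i, val in enumerate(values):
--         if isinstance(val, float):
--             raise ValueError(f"RAIL_FAIL:R0 Float detected at position {i}: {val} (type: {type(val)})")
--
-- def leb_len(n: int) -> int:
--     """7-bit groups count for unsigned n"""
--     assert_integer_only(n)
--     if n <= 0:
--         return 1 if n == 0 else 0
--     return (n.bit_length() + 6) // 7
-- ===== Notes on version B (the rewrite author's own statement) =====
-- stated objective: simpler
-- what changed: Replaces the shift loop with a closed form: ceiling of the bit length over the group width for positive inputs, with a direct guard giving the loop's values on non-positive inputs.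
import Mathlib
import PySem

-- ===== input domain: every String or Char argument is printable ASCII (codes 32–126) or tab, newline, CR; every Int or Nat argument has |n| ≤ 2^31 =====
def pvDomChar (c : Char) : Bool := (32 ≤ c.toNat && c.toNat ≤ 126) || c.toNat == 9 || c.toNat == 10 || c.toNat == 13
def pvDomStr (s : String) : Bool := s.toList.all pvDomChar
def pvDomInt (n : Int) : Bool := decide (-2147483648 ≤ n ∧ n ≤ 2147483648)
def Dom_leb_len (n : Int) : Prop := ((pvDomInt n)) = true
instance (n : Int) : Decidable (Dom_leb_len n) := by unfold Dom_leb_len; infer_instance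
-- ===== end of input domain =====

-- B replaces A's 7-bit shift loop with the closed form (bit_length(n)+6)//7 (simpler, one arithmetic step).

-- ===== PORT A =====
-- assert_integer_only is a no-op on an int argument (it only rejects floats), so it ports to the identity check.
-- the while loop: length += 1; n >>= 7
def leb_loop (n : Int) (length : Int) : Int :=
  if 0 < n then leb_loop (n >>> (7 : Nat)) (length + 1) else length
termination_by n.toNat
decreasing_by
  have h : n >>> (7 : Nat) = n / 128 := by
    simp [Int.shiftRight_eq_div_pow]
  omega

def leb_len (n : Int) : Int :=
  if n = 0 then 1 else leb_loop n 0

-- ===== PORT B =====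
def leb_len_alt (n : Int) : Int :=
  if n ≤ 0 then (if n = 0 then 1 else 0)
  else PySem.Int.floordiv ((PySem.Int.bitLength n : Int) + 6) 7

-- ===== PRECONDITION & SPEC =====
def Spec_leb_len (n : Int) (out : Int) : Prop := out = leb_len_alt n
instance (n : Int) (out : Int) : Decidable (Spec_leb_len n out) := by unfold Spec_leb_len; infer_instance

-- ===== CLAIM (what is proved, stated in full; the proofs are below) =====
def Claim_equal_leb_len : Prop := ∀ (n : Int), Dom_leb_len n → Spec_leb_len n (leb_len n)

-- ===== LEMMAS AND PROOFS =====

-- seven halvings: bit_length drops by 7 when dividing by 128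
theorem bl_div128 (m : Nat) (h : 128 ≤ m) :
    PySem.Int.bitLength (m : Int) = PySem.Int.bitLength ((m / 128 : Nat) : Int) + 7 := by
  have e : m / 2 / 2 / 2 / 2 / 2 / 2 / 2 = m / 128 := by omega
  have h1 := PySem.Int.bitLength_natCast (m := m) (by omega)
  have h2 := PySem.Int.bitLength_natCast (m := m / 2) (by omega)
  have h3 := PySem.Int.bitLength_natCast (m := m / 2 / 2) (by omega)
  have h4 := PySem.Int.bitLength_natCast (m := m / 2 / 2 / 2) (by omega)
  have h5 := PySem.Int.bitLength_natCast (m := m / 2 / 2 / 2 / 2) (by omega)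
  have h6 := PySem.Int.bitLength_natCast (m := m / 2 / 2 / 2 / 2 / 2) (by omega)
  have h7 := PySem.Int.bitLength_natCast (m := m / 2 / 2 / 2 / 2 / 2 / 2) (by omega)
  rw [h1, h2, h3, h4, h5, h6, h7, e]

-- for 0 < m < 128, bit_length is between 1 and 7
theorem bl_small (m : Nat) (hm : 0 < m) (h : m < 128) :
    1 ≤ PySem.Int.bitLength (m : Int) ∧ PySem.Int.bitLength (m : Int) ≤ 7 := by
  have hA : m < 2 ^ PySem.Int.bitLength (m : Int) := by
    simpa using PySem.Int.lt_two_pow_bitLength (m : Int)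
  have hne : (m : Int) ≠ 0 := by exact_mod_cast hm.ne'
  have hB : 2 ^ (PySem.Int.bitLength (m : Int) - 1) ≤ m := by
    simpa using PySem.Int.two_pow_bitLength_le (m : Int) hne
  constructor
  · rcases Nat.eq_zero_or_pos (PySem.Int.bitLength (m : Int)) with h0 | h0
    · rw [h0] at hA; simp at hA; omega
    · omega
  · by_contra hc
    push Not at hc
    have h7 : 7 ≤ PySem.Int.bitLength (m : Int) - 1 := by omega
    have : (128 : Nat) ≤ 2 ^ (PySem.Int.bitLength (m : Int) - 1) :=
      calc (128 : Nat) = 2 ^ 7 := by norm_num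
        _ ≤ 2 ^ (PySem.Int.bitLength (m : Int) - 1) := Nat.pow_le_pow_right (by norm_num) h7
    omega

theorem leb_loop_eq (m : Nat) : ∀ len : Int, 0 < m →
    leb_loop (m : Int) len = len + ((PySem.Int.bitLength (m : Int) + 6) / 7 : Nat) := by
  induction m using Nat.strong_induction_on with
  | _ m ih =>
    intro len hm
    have hpos : (0 : Int) < (m : Int) := by exact_mod_cast hm
    have hshift : ((m : Int) >>> (7 : Nat)) = ((m / 128 : Nat) : Int) := by
      rw [Int.natCast_div]
      simp [Int.shiftRight_eq_div_pow]
    rw [leb_loop, if_pos hpos, hshift]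
    by_cases h128 : 128 ≤ m
    · rw [ih (m / 128) (by omega) (len + 1) (by omega), bl_div128 m h128]
      omega
    · have hz : m / 128 = 0 := by omega
      rw [hz]
      rw [leb_loop, if_neg (by norm_num)]
      have := bl_small m hm (by omega)
      omega

theorem leb_len_eq_alt (n : Int) : leb_len n = leb_len_alt n := by
  by_cases h0 : n = 0
  · simp [leb_len, leb_len_alt, h0]
  · by_cases hneg : n ≤ 0
    · rw [leb_len, if_neg h0, leb_loop, if_neg (by omega),
        leb_len_alt, if_pos hneg, if_neg h0]
    · push Not at hneg
      have hcast : n = ((n.toNat : Nat) : Int) := by omega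
      rw [leb_len, if_neg h0, leb_len_alt, if_neg (by omega)]
      rw [hcast, leb_loop_eq n.toNat 0 (by omega)]
      rw [show ((PySem.Int.bitLength ((n.toNat : Nat) : Int) : Int) + 6)
            = (((PySem.Int.bitLength ((n.toNat : Nat) : Int) + 6 : Nat)) : Int) by push_cast; ring,
        show (7 : Int) = ((7 : Nat) : Int) by norm_num,
        PySem.Int.floordiv_natCast]
      omega

-- ===== VERDICT (by name: the statement is the Claim_ definition above) =====
theorem leb_len_spec : Claim_equal_leb_len := by
  intro n _
  exact leb_len_eq_alt n
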